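-- pv_equiv track=rewrite | github.com/jcolinpatrick/kryptos | src/kryptos/kernel/constraints/crib.py | periodicity_score
-- ===== SOURCE A (Python) =====
-- from collections import Counter, defaultdict
-- from typing import Dict, List, Optional, Tuple
--
-- def periodicity_score(
--     key_values: Dict[int, int], period: int,
-- ) -> Tuple[int, int, int]:
--     """Score how well key values fit a periodic pattern.
--
--     Groups key values by (position % period). For each group,
--     counts pairs that agree.
--
--     Returns (agreeing_pairs, total_pairs, contradicting_groups).
--     """
--     groups: dict[int, list[int]] = defaultdict(list)
--     for pos, val in key_values.items():
--         groups[pos % period].append(val)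
--
--     agree = total = contradictions = 0
--     for vals in groups.values():
--         if len(vals) >= 2:
--             npairs = len(vals) * (len(vals) - 1) // 2
--             total += npairs
--             if len(set(vals)) == 1:
--                 agree += npairs
--             else:
--                 contradictions += 1
--                 for i in range(len(vals)):
--                     for j in range(i + 1, len(vals)):
--                         if vals[i] == vals[j]:
--                             agree += 1
--     return agree, total, contradictions
-- ===== SOURCE B (Python) =====
-- from collections import Counter, defaultdict
-- from typing import Dict, Tuple
--
--
-- def periodicity_score(
--     key_values: Dict[int, int], period: int,
-- ) -> Tuple[int, int, int]:
--     """Score how well key values fit a periodic pattern.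
--
--     Same result as the original, but each group is scored from a value
--     frequency table: agreeing pairs = sum of c*(c-1)//2 over the counts,
--     with no all-pairs index scan.
--     """
--     groups: dict[int, list[int]] = defaultdict(list)
--     for pos, val in key_values.items():
--         groups[pos % period].append(val)
--
--     agree = total = contradictions = 0
--     for vals in groups.values():
--         n = len(vals)
--         if n < 2:
--             continue
--         total += n * (n - 1) // 2
--         freq = Counter(vals)
--         agree += sum(c * (c - 1) // 2 for c in freq.values())
--         if len(freq) > 1:
--             contradictions += 1
--     return agree, total, contradictions
-- ===== Notes on version B (the rewrite author's own statement) =====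
-- stated objective: alternative
-- what changed: Each group is scored from a Counter of value frequencies (agreeing pairs = sum of c*(c-1)//2 over counts, contradiction iff more than one distinct value), replacing A's quadratic all-pairs index scan and its separate all-equal special case; avoids the O(m^2) pair scan on contradicting groups, same cost elsewhere.
import Mathlib
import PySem

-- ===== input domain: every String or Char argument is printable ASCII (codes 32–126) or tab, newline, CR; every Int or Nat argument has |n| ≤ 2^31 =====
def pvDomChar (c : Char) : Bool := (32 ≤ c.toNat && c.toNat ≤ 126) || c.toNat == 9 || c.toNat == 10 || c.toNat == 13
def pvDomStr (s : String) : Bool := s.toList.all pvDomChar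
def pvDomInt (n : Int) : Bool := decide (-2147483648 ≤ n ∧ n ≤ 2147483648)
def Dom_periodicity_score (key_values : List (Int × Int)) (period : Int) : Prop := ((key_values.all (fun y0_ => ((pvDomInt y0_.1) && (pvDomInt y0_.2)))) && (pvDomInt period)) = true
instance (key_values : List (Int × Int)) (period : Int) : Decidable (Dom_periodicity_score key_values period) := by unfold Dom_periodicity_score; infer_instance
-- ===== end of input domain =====

-- B scores each group from a value-frequency table (sum of c*(c-1)//2) instead of A's all-pairs index scan; objective: alternative.

-- ===== PORT A =====
def periodicity_score (key_values : List (Int × Int)) (period : Int) : Int × Int × Int :=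
  let groups : PySem.Dict Int (List Int) :=
    key_values.foldl (fun d kv => d.modify (PySem.Int.mod kv.1 period) [] (fun l => l ++ [kv.2]))
      PySem.Dict.empty
  groups.values.foldl
    (fun st vals =>
      if 2 ≤ vals.length then
        let npairs : Int := PySem.Int.floordiv ((vals.length : Int) * ((vals.length : Int) - 1)) 2
        let total := st.2.1 + npairs
        if (PySem.Set.ofList vals).length == 1 then
          (st.1 + npairs, total, st.2.2)
        else
          let contradictions := st.2.2 + 1
          let agree :=
            (PySem.List.pyRange 0 (vals.length : Int) 1).foldl
              (fun ag i =>
                (PySem.List.pyRange (i + 1) (vals.length : Int) 1).foldl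
                  (fun ag j =>
                    if PySem.List.pyGetD vals i 0 == PySem.List.pyGetD vals j 0 then ag + 1 else ag)
                  ag)
              st.1
          (agree, total, contradictions)
      else st)
    (0, 0, 0)

-- ===== PORT B =====
def periodicity_score_alt (key_values : List (Int × Int)) (period : Int) : Int × Int × Int :=
  let groups : PySem.Dict Int (List Int) :=
    key_values.foldl (fun d kv => d.modify (PySem.Int.mod kv.1 period) [] (fun l => l ++ [kv.2]))
      PySem.Dict.empty
  groups.values.foldl
    (fun st vals =>
      let n : Int := (vals.length : Int)
      if n < 2 then st
      else
        let total := st.2.1 + PySem.Int.floordiv (n * (n - 1)) 2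
        let freq : PySem.Dict Int Int := PySem.Dict.counter vals
        let agree := st.1 + (freq.values.map (fun c => PySem.Int.floordiv (c * (c - 1)) 2)).sum
        let contradictions := if 1 < freq.size then st.2.2 + 1 else st.2.2
        (agree, total, contradictions))
    (0, 0, 0)

-- ===== PRECONDITION & SPEC =====
-- Pre_ excludes period = 0, on which Python A raises ZeroDivisionError, and lists with duplicate
-- keys, which cannot arise from A's dict[int, int] argument (a dict has unique keys).
def Pre_periodicity_score (key_values : List (Int × Int)) (period : Int) : Prop :=
  period ≠ 0 ∧ (key_values.map Prod.fst).Nodup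
instance (key_values : List (Int × Int)) (period : Int) : Decidable (Pre_periodicity_score key_values period) := by unfold Pre_periodicity_score; infer_instance
def pvWitness_periodicity_score : (List (Int × Int)) × Int := ([(0, 1), (1, 2), (2, 1), (4, 1)], 2)

def Spec_periodicity_score (key_values : List (Int × Int)) (period : Int) (out : Int × Int × Int) : Prop := out = periodicity_score_alt key_values period
instance (key_values : List (Int × Int)) (period : Int) (out : Int × Int × Int) : Decidable (Spec_periodicity_score key_values period out) := by unfold Spec_periodicity_score; infer_instance

-- ===== CLAIM (what is proved, stated in full; the proofs are below) =====
def Claim_equal_periodicity_score : Prop := ∀ (key_values : List (Int × Int)) (period : Int), Dom_periodicity_score key_values period → Pre_periodicity_score key_values period → Spec_periodicity_score key_values period (periodicity_score key_values period)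

-- ===== LEMMAS AND PROOFS =====

-- number of unordered equal pairs in a list, scanned front to back (A's double loop computes this)
def eqp : List Int → Int
  | [] => 0
  | x :: rest => (rest.count x : Int) + eqp rest

-- B's per-group score: sum of c*(c-1)//2 over the value frequencies
def cntScore (vals : List Int) : Int :=
  ((PySem.Dict.counter vals).values.map (fun c => PySem.Int.floordiv (c * (c - 1)) 2)).sum

theorem fdiv_step (c : Int) :
    PySem.Int.floordiv ((c + 1) * c) 2 = PySem.Int.floordiv (c * (c - 1)) 2 + c := by
  rw [PySem.Int.floordiv_eq_ediv_of_pos (by norm_num), PySem.Int.floordiv_eq_ediv_of_pos (by norm_num)]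
  have h2 : 2 ∣ c * (c - 1) := by
    have h := Int.even_mul_succ_self (c - 1)
    rw [mul_comm]; simpa [sub_add_cancel] using h.two_dvd
  have h1 : (c + 1) * c = c * (c - 1) + 2 * c := by ring
  omega

theorem inner_eq (vals : List Int) (x a0 : Int) (k : Nat) :
    (PySem.List.pyRange (k : Int) (vals.length : Int) 1).foldl
      (fun ag j => if x == PySem.List.pyGetD vals j 0 then ag + 1 else ag) a0
    = a0 + ((vals.drop k).count x : Int) := by
  rw [PySem.List.foldl_pyRange_pyGetD' vals 0 (fun ag y => if x == y then ag + 1 else ag) a0 (Int.natCast_nonneg k)]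
  rw [PySem.List.foldl_count_if (fun y => x == y) _ a0]
  simp [List.count, Int.toNat_natCast, BEq.comm]

theorem outer_eq (vals : List Int) (k : Nat) (a0 : Int) (hk : k ≤ vals.length) :
    (PySem.List.pyRange (k : Int) (vals.length : Int) 1).foldl
      (fun ag i =>
        (PySem.List.pyRange (i + 1) (vals.length : Int) 1).foldl
          (fun ag j =>
            if PySem.List.pyGetD vals i 0 == PySem.List.pyGetD vals j 0 then ag + 1 else ag)
          ag) a0
    = a0 + eqp (vals.drop k) := by
  induction hn : vals.length - k generalizing k a0 with
  | zero =>
    have hkl : k = vals.length := by omega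
    subst hkl
    rw [PySem.List.pyRange_one_eq_nil le_rfl]
    simp [List.drop_length, eqp]
  | succ m ih =>
    have hlt : k < vals.length := by omega
    rw [PySem.List.pyRange_one_cons (by exact_mod_cast hlt)]
    rw [List.foldl_cons]
    have hcast : (k : Int) + 1 = ((k + 1 : Nat) : Int) := by push_cast; ring
    rw [hcast, inner_eq vals _ a0 (k + 1)]
    rw [ih (k + 1) _ (by omega) (by omega)]
    have hdrop : vals.drop k = vals[k] :: vals.drop (k + 1) := List.drop_eq_getElem_cons hlt
    rw [hdrop]
    have hget : PySem.List.pyGetD vals (k : Int) 0 = vals[k] :=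
      PySem.List.pyGetD_eq_getElem vals 0 (Int.natCast_nonneg k) (by exact_mod_cast hlt)
    rw [hget]
    simp [eqp]
    ring

theorem cntScore_eq (l : List Int) :
    cntScore l = ((PySem.Set.ofList l).map (fun k => PySem.Int.floordiv ((l.count k : Int) * ((l.count k : Int) - 1)) 2)).sum := by
  simp [cntScore, PySem.Dict.values, PySem.Dict.items_counter, List.map_map, Function.comp_def]

theorem sum_map_update (g g' : Int → Int) (L : List Int) (v : Int) (hN : L.Nodup) (hv : v ∈ L)
    (hoff : ∀ k ∈ L, k ≠ v → g' k = g k) :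
    (L.map g').sum = (L.map g).sum + (g' v - g v) := by
  induction L with
  | nil => cases hv
  | cons x L ih =>
    rcases List.nodup_cons.mp hN with ⟨hxL, hNL⟩
    by_cases hxv : x = v
    · subst hxv
      have : ∀ k ∈ L, g' k = g k := fun k hk => hoff k (List.mem_cons_of_mem _ hk) (fun h => hxL (h ▸ hk))
      simp [List.map_congr_left this]
      ring
    · have hvL : v ∈ L := by rcases List.mem_cons.mp hv with h | h; exact absurd h.symm hxv; exact h
      have := ih hNL hvL (fun k hk hkv => hoff k (List.mem_cons_of_mem _ hk) hkv)
      simp [this, hoff x (List.mem_cons_self ..) hxv]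
      ring

theorem cntScore_append (l : List Int) (v : Int) :
    cntScore (l ++ [v]) = cntScore l + (l.count v : Int) := by
  rw [cntScore_eq, cntScore_eq]
  have hset : PySem.Set.ofList (l ++ [v]) = PySem.Set.add (PySem.Set.ofList l) v := by
    simp [PySem.Set.ofList_eq_foldl, List.foldl_append]
  rw [hset]
  by_cases hv : v ∈ l
  · have hvs : v ∈ PySem.Set.ofList l := (PySem.Set.mem_ofList l v).mpr hv
    have hadd : PySem.Set.add (PySem.Set.ofList l) v = PySem.Set.ofList l := by
      simp [PySem.Set.add, hvs]
    rw [hadd]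
    have hoff' : ∀ k ∈ PySem.Set.ofList l, k ≠ v →
        (fun k => PySem.Int.floordiv (((l ++ [v]).count k : Int) * (((l ++ [v]).count k : Int) - 1)) 2) k
        = (fun k => PySem.Int.floordiv ((l.count k : Int) * ((l.count k : Int) - 1)) 2) k := by
      intro k hk hkv
      have hc2 : (l ++ [v]).count k = l.count k := by
        simp [List.count_append, Ne.symm hkv]
      simp only [hc2]
    have hupd := sum_map_update
      (fun k => PySem.Int.floordiv ((l.count k : Int) * ((l.count k : Int) - 1)) 2)
      (fun k => PySem.Int.floordiv (((l ++ [v]).count k : Int) * (((l ++ [v]).count k : Int) - 1)) 2)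
      (PySem.Set.ofList l) v (PySem.Set.nodup_ofList l) hvs hoff'
    rw [hupd]
    have hc : ((l ++ [v]).count v : Int) = (l.count v : Int) + 1 := by
      simp [List.count_append]
    simp only [hc]
    have harg : ((l.count v : Int) + 1) * ((l.count v : Int) + 1 - 1) = ((l.count v : Int) + 1) * (l.count v : Int) := by ring
    rw [harg, fdiv_step]
    ring
  · have hvs : v ∉ PySem.Set.ofList l := fun h => hv ((PySem.Set.mem_ofList l v).mp h)
    have hadd : PySem.Set.add (PySem.Set.ofList l) v = PySem.Set.ofList l ++ [v] := by
      simp [PySem.Set.add, hvs]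
    rw [hadd, List.map_append, List.sum_append]
    have h1 : ∀ k ∈ PySem.Set.ofList l, (l ++ [v]).count k = l.count k := by
      intro k hk
      have hkv : k ≠ v := fun h => hv (h ▸ (PySem.Set.mem_ofList l k).mp hk)
      simp [List.count_append, Ne.symm hkv]
    have hmap : (PySem.Set.ofList l).map (fun k => PySem.Int.floordiv (((l ++ [v]).count k : Int) * (((l ++ [v]).count k : Int) - 1)) 2)
        = (PySem.Set.ofList l).map (fun k => PySem.Int.floordiv ((l.count k : Int) * ((l.count k : Int) - 1)) 2) := by
      apply List.map_congr_left
      intro k hk; rw [h1 k hk]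
    rw [hmap]
    have hcv : (l ++ [v]).count v = 1 := by simp [List.count_append, List.count_eq_zero.mpr hv]
    have hcv0 : (l.count v : Int) = 0 := by simp [List.count_eq_zero.mpr hv]
    simp [hcv0, PySem.Int.floordiv]

theorem eqp_append (l : List Int) (v : Int) :
    eqp (l ++ [v]) = eqp l + (l.count v : Int) := by
  induction l with
  | nil => simp [eqp]
  | cons x l ih =>
    simp only [List.cons_append, eqp, ih, List.count_append, List.count_cons]
    by_cases h : v = x <;> simp [h, Ne.symm] <;> ring

theorem eqp_eq_cntScore (l : List Int) : eqp l = cntScore l := by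
  induction l using List.reverseRecOn with
  | nil => simp [eqp, cntScore, PySem.Dict.counter, PySem.Dict.empty, PySem.Dict.values]
  | append_singleton l v ih => rw [eqp_append, cntScore_append, ih]

theorem size_counter (vals : List Int) :
    (PySem.Dict.counter vals).size = (PySem.Set.ofList vals).length := by
  simp [PySem.Dict.size, PySem.Dict.items_counter]

theorem cntScore_of_const (vals : List Int) (h : (PySem.Set.ofList vals).length = 1) :
    cntScore vals = PySem.Int.floordiv ((vals.length : Int) * ((vals.length : Int) - 1)) 2 := by
  obtain ⟨a, ha⟩ := List.length_eq_one_iff.mp h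
  have hall : ∀ b ∈ vals, a = b := by
    intro b hb
    have : b ∈ PySem.Set.ofList vals := (PySem.Set.mem_ofList vals b).mpr hb
    rw [ha] at this
    exact (List.mem_singleton.mp this).symm
  have hcount : vals.count a = vals.length := List.count_eq_length.mpr hall
  rw [cntScore_eq, ha]
  simp [hcount]

-- ===== VERDICT (by name: the statement is the Claim_ definition above) =====
theorem periodicity_score_spec : Claim_equal_periodicity_score := by
  intro key_values period _ _
  unfold Spec_periodicity_score periodicity_score periodicity_score_alt
  apply List.foldl_ext
  intro st vals _
  by_cases h2 : 2 ≤ vals.length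
  · have hB : ¬ ((vals.length : Int) < 2) := by exact_mod_cast not_lt.mpr h2
    rw [if_pos h2, if_neg hB]
    have hne : vals ≠ [] := by intro h; rw [h] at h2; simp at h2
    have hpos : 1 ≤ (PySem.Set.ofList vals).length := by
      obtain ⟨x, hx⟩ := List.exists_mem_of_ne_nil vals hne
      have : x ∈ PySem.Set.ofList vals := (PySem.Set.mem_ofList vals x).mpr hx
      exact List.length_pos_of_mem this
    by_cases hone : (PySem.Set.ofList vals).length = 1
    · have hsz : ¬ (1 < (PySem.Dict.counter vals).size) := by
        rw [size_counter, hone]; omega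
      have hc := cntScore_of_const vals hone
      simp only [cntScore] at hc
      simp only [hone, beq_self_eq_true, if_pos, if_neg hsz, hc]
    · have hbne : ((PySem.Set.ofList vals).length == 1) = false := by
        simp [hone]
      rw [hbne]
      simp only [Bool.false_eq_true, if_false]
      have hsz : 1 < (PySem.Dict.counter vals).size := by
        rw [size_counter]; omega
      rw [if_pos hsz]
      have ho := outer_eq vals 0 st.1 (by omega)
      rw [Nat.cast_zero] at ho
      simp only [List.drop_zero, eqp_eq_cntScore, cntScore] at ho
      rw [ho]
  · have hB : (vals.length : Int) < 2 := by exact_mod_cast not_le.mp h2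
    rw [if_neg h2, if_pos hB]
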